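-- pv_equiv track=rewrite | github.com/oktaviacitra/neural-network-perceptron | main.py | implements_true
-- ===== SOURCE A (Python) =====
-- def find_index(inputs):
--     index = []
--     for i in range(len(inputs)):
--         if inputs[i] == 1:
--             index.append(i)
--     return index
--
-- def implements_true(inputs, w2):
--     index = find_index(inputs)
--     result = []
--     j = 0
--     for i in range(len(w2)):
--         if(j >= len(index)):
--             break
--         else:
--             if i == index[j]:
--                 result.append(w2[i])
--                 j += 1
--     return sum(result)
-- ===== SOURCE B (Python) =====
-- def implements_true(inputs, w2):
--     return sum(w for inp, w in zip(inputs, w2) if inp == 1)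
-- ===== Notes on version B (the rewrite author's own statement) =====
-- stated objective: idiomatic
-- what changed: Drops the find_index helper and the two-pointer merge over an index list; B is a single filtered pass over zip(inputs, w2), relying on zip truncation to match the i<len(w2) cutoff.
import Mathlib
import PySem

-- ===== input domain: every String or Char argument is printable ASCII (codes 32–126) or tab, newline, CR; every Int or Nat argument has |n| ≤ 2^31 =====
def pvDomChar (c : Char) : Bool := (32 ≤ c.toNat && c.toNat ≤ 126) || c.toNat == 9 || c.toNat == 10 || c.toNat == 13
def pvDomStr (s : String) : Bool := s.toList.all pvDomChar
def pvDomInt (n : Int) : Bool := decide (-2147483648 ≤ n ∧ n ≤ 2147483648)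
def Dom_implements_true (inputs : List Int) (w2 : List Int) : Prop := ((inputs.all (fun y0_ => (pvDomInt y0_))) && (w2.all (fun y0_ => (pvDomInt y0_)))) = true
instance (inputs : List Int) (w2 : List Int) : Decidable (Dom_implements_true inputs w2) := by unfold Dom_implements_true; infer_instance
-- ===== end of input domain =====

-- B replaces A's find_index list + two-pointer merge by a single filtered pass over zip(inputs, w2) (idiomatic; return value only).


-- ===== PORT A =====
-- find_index: collect (as Nat, all indices are nonnegative) the positions i with inputs[i] == 1;
-- inputs.getD i 0 is exact since i < len(inputs) throughout the range loop.
def findIndexA (inputs : List Int) : List Nat :=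
  (List.range inputs.length).foldl
    (fun idx i => if inputs.getD i 0 = 1 then idx ++ [i] else idx) []

-- the merge loop of implements_true: walks i over range(len(w2)) with pointer j into index,
-- breaking when j >= len(index); w2.getD i 0 is exact since i < len(w2).
def goA (w2 : List Int) (index : List Nat) (is_ : List Nat) (j : Nat) (result : List Int) : List Int :=
  match is_ with
  | [] => result
  | i :: rest =>
    if j ≥ index.length then result
    else if i = index.getD j 0 then goA w2 index rest (j + 1) (result ++ [w2.getD i 0])
    else goA w2 index rest j result

def implements_true (inputs : List Int) (w2 : List Int) : Int :=
  (goA w2 (findIndexA inputs) (List.range w2.length) 0 []).sum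

-- ===== PORT B =====
-- sum(w for inp, w in zip(inputs, w2) if inp == 1)
def implements_true_alt (inputs : List Int) (w2 : List Int) : Int :=
  (inputs.zip w2).foldl (fun acc p => if p.1 = 1 then acc + p.2 else acc) 0

-- ===== PRECONDITION & SPEC =====
def Spec_implements_true (inputs : List Int) (w2 : List Int) (out : Int) : Prop := out = implements_true_alt inputs w2
instance (inputs : List Int) (w2 : List Int) (out : Int) : Decidable (Spec_implements_true inputs w2 out) := by unfold Spec_implements_true; infer_instance

-- ===== CLAIM (what is proved, stated in full; the proofs are below) =====
def Claim_equal_implements_true : Prop := ∀ (inputs : List Int) (w2 : List Int), Dom_implements_true inputs w2 → Spec_implements_true inputs w2 (implements_true inputs w2)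

-- ===== LEMMAS AND PROOFS =====

theorem goA_nil_index (w2 : List Int) (is_ : List Nat) (j : Nat) (result : List Int) :
    goA w2 [] is_ j result = result := by
  cases is_ <;> simp [goA]

theorem goA_acc (w2 : List Int) (index : List Nat) (is_ : List Nat) (j : Nat) (result : List Int) :
    goA w2 index is_ j result = result ++ goA w2 index is_ j [] := by
  induction is_ generalizing j result with
  | nil => simp [goA]
  | cons i rest ih =>
    simp only [goA]
    split
    · simp
    · split
      · rw [ih (j + 1) (result ++ _), ih (j + 1) ([] ++ _)]
        simp
      · exact ih j result

theorem goA_cons_j (w2 : List Int) (a : Nat) (index : List Nat) (is_ : List Nat) (j : Nat)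
    (result : List Int) :
    goA w2 (a :: index) is_ (j + 1) result = goA w2 index is_ j result := by
  induction is_ generalizing j result with
  | nil => simp [goA]
  | cons i rest ih =>
    simp only [goA, List.length_cons, List.getD_cons_succ]
    have : j + 1 ≥ index.length + 1 ↔ j ≥ index.length := by omega
    rw [if_congr this rfl rfl]
    split
    · rfl
    · split
      · exact ih (j + 1) _
      · exact ih j result

theorem goA_shift (w : Int) (ws : List Int) (index : List Nat) (is_ : List Nat) (j : Nat)
    (result : List Int) :
    goA (w :: ws) (index.map (· + 1)) (is_.map (· + 1)) j result = goA ws index is_ j result := by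
  induction is_ generalizing j result with
  | nil => simp [goA]
  | cons i rest ih =>
    simp only [List.map_cons, goA, List.length_map]
    split
    · rfl
    · rename_i hj
      have hjlt : j < index.length := by omega
      have hget : (index.map (· + 1)).getD j 0 = index.getD j 0 + 1 := by
        rw [List.getD_eq_getElem _ _ (by simpa using hjlt), List.getD_eq_getElem _ _ hjlt]
        simp
      rw [hget]
      have heq : i + 1 = index.getD j 0 + 1 ↔ i = index.getD j 0 := by omega
      rw [if_congr heq rfl rfl]
      split
      · rw [List.getD_cons_succ]; exact ih (j + 1) _
      · exact ih j result

theorem findIndexA_foldl (inputs : List Int) (l : List Nat) (acc : List Nat) :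
    l.foldl (fun idx i => if inputs.getD i 0 = 1 then idx ++ [i] else idx) acc
      = acc ++ l.filter (fun i => decide (inputs.getD i 0 = 1)) := by
  induction l generalizing acc with
  | nil => simp
  | cons i rest ih =>
    simp only [List.foldl_cons, List.filter_cons]
    simp only [List.getD_eq_getElem?_getD] at ih ⊢
    by_cases h : inputs[i]?.getD 0 = 1
    · rw [if_pos h, ih]
      simp [h]
    · rw [if_neg h, ih]
      simp [h]

theorem findIndexA_eq_filter (inputs : List Int) :
    findIndexA inputs
      = (List.range inputs.length).filter (fun i => decide (inputs.getD i 0 = 1)) := by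
  simpa using findIndexA_foldl inputs (List.range inputs.length) []

theorem findIndexA_cons (x : Int) (xs : List Int) :
    findIndexA (x :: xs)
      = (if x = 1 then [0] else []) ++ (findIndexA xs).map (· + 1) := by
  rw [findIndexA_eq_filter, findIndexA_eq_filter]
  simp only [List.length_cons, List.range_succ_eq_map, List.filter_cons, List.getD_cons_zero]
  by_cases h : x = 1 <;>
    simp [h, List.filter_map, Function.comp_def, Nat.succ_eq_add_one] <;>
    exact List.map_congr_left fun a _ => rfl

theorem alt_foldl_init (l : List (Int × Int)) (a : Int) :
    l.foldl (fun acc p => if p.1 = 1 then acc + p.2 else acc) a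
      = a + l.foldl (fun acc p => if p.1 = 1 then acc + p.2 else acc) 0 := by
  induction l generalizing a with
  | nil => simp
  | cons p rest ih =>
    simp only [List.foldl_cons]
    by_cases h : p.1 = 1
    · simp only [if_pos h]
      rw [ih (a + p.2), ih (0 + p.2)]
      ring
    · simp only [if_neg h]
      exact ih a

theorem implements_true_rec (x : Int) (xs : List Int) (w : Int) (ws : List Int) :
    implements_true (x :: xs) (w :: ws)
      = (if x = 1 then w else 0) + implements_true xs ws := by
  unfold implements_true
  rw [findIndexA_cons]
  have hrange : List.range (w :: ws).length = 0 :: (List.range ws.length).map (· + 1) := by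
    simp [List.range_succ_eq_map]
  rw [hrange]
  by_cases h : x = 1
  · simp only [if_pos h, List.singleton_append, goA]
    have hlen : ¬ (0 ≥ ((0 : Nat) :: (findIndexA xs).map (· + 1)).length) := by simp
    rw [if_neg hlen]
    simp only [List.getD_cons_zero, List.nil_append]
    rw [goA_cons_j, goA_shift, goA_acc]
    simp
  · simp only [if_neg h, List.nil_append]
    cases hfi : findIndexA xs with
    | nil => simp [goA_nil_index]
    | cons a t =>
      simp only [goA, List.map_cons, List.length_cons, List.getD_cons_zero]
      have h0 : ¬ ((0 : Nat) ≥ (t.map (· + 1)).length + 1) := by simp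
      rw [if_neg h0]
      have hne : ¬ ((0 : Nat) = a + 1) := by omega
      rw [if_neg hne,
        show ((a + 1) :: t.map (· + 1)) = (a :: t).map (· + 1) from rfl, ← hfi, goA_shift]
      simp

theorem implements_true_nil_left (w2 : List Int) : implements_true [] w2 = 0 := by
  unfold implements_true
  simp [findIndexA, goA_nil_index]

theorem implements_true_nil_right (inputs : List Int) : implements_true inputs [] = 0 := by
  unfold implements_true
  simp [List.range_zero, goA]

theorem implements_true_eq_alt (inputs : List Int) (w2 : List Int) :
    implements_true inputs w2 = implements_true_alt inputs w2 := by
  induction inputs generalizing w2 with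
  | nil => simp [implements_true_nil_left, implements_true_alt]
  | cons x xs ih =>
    cases w2 with
    | nil => simp [implements_true_nil_right, implements_true_alt]
    | cons w ws =>
      rw [implements_true_rec, ih ws]
      unfold implements_true_alt
      simp only [List.zip_cons_cons, List.foldl_cons]
      by_cases h : x = 1
      · simp only [if_pos h]
        rw [alt_foldl_init (xs.zip ws) (0 + w)]
        ring
      · simp only [if_neg h]
        simp

-- ===== VERDICT (by name: the statement is the Claim_ definition above) =====
theorem implements_true_spec : Claim_equal_implements_true := by
  intro inputs w2 _
  unfold Spec_implements_true
  exact implements_true_eq_alt inputs w2
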